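-- pv_equiv track=rewrite | github.com/artemgol20/kurs | teoria/.Pr/3_3.py | build_lattice
-- ===== SOURCE A (Python) =====
-- def build_lattice(concepts):
--     edges = []
--     for A1, B1 in concepts:
--         for A2, B2 in concepts:
--             if A1 < A2 and B2 < B1:  # A1 ⊆ A2 и B2 ⊆ B1
--                 if not any(A1 < Am < A2 and B2 < Bm < B1 for Am, Bm in concepts):
--                     edges.append((A1, A2))
--     return edges
-- ===== SOURCE B (Python) =====
-- def build_lattice(concepts):
--     # Transitive-reduction formulation: build the order-relation rows once,
--     # compose the relation with itself by one boolean matrix product (row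
--     # unions), then emit exactly the pairs in R but not in R o R.
--     n = len(concepts)
--     rows = [[A1 < A2 and B2 < B1 for A2, B2 in concepts] for A1, B1 in concepts]
--     comp = [compose_row(row, rows, n) for row in rows]
--     edges = []
--     for (A1, _), row, crow in zip(concepts, rows, comp):
--         for (A2, _), r, c in zip(concepts, row, crow):
--             if r and not c:
--                 edges.append((A1, A2))
--     return edges
--
-- def compose_row(row, rows, n):
--     c = [False] * n
--     for f, rk in zip(row, rows):
--         if f:
--             c = [x or y for x, y in zip(c, rk)]
--     return c
-- ===== Notes on version B (the rewrite author's own statement) =====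
-- stated objective: alternative
-- what changed: B recasts the task as a transitive reduction: it builds the order-relation rows once, computes the composed relation R∘R by a boolean matrix product (row unions), and emits the pairs in R but not in R∘R — no per-pair existential scan with list re-comparisons.
import Mathlib
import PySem

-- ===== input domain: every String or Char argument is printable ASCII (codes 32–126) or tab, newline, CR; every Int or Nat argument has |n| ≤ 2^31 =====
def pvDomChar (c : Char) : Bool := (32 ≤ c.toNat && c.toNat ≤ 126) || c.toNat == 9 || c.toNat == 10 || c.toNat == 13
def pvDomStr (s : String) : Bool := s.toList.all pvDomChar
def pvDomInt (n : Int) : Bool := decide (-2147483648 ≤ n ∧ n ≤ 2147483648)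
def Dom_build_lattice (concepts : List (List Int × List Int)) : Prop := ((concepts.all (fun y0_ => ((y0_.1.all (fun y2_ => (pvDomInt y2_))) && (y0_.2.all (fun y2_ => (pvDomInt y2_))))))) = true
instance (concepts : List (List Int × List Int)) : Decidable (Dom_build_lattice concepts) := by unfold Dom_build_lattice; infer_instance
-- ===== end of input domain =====

-- B recasts the task as a transitive reduction: order-relation rows built once, the
-- composed relation computed by one boolean matrix product (row unions), then a pure
-- filter pass R \ (R∘R) — an alternative staged decomposition, no per-pair scan.

-- Python's '<' on sets (proper subset; a set is a list of distinct elements, order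
-- ignored), shared transliteration of the builtin used by both ports
def setLt (xs ys : List Int) : Bool :=
  xs.all (fun a => ys.contains a) && !(ys.all (fun b => xs.contains b))

-- ===== PORT A =====
def build_lattice (concepts : List (List Int × List Int)) : List (List Int × List Int) :=
  concepts.foldl (fun edges p1 =>
    concepts.foldl (fun edges p2 =>
      if setLt p1.1 p2.1 && setLt p2.2 p1.2 then
        if !(concepts.any (fun pm =>
              setLt p1.1 pm.1 && setLt pm.1 p2.1 && setLt p2.2 pm.2 && setLt pm.2 p1.2)) then
          edges ++ [(p1.1, p2.1)]
        else edges
      else edges) edges) []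

-- ===== PORT B =====
def compose_row (row : List Bool) (rows : List (List Bool)) (n : Nat) : List Bool :=
  (row.zip rows).foldl (fun c fr => if fr.1 then c.zipWith (· || ·) fr.2 else c)
    (List.replicate n false)

def build_lattice_alt (concepts : List (List Int × List Int)) : List (List Int × List Int) :=
  let n := concepts.length
  let rows := concepts.map (fun p => concepts.map (fun q => setLt p.1 q.1 && setLt q.2 p.2))
  let comp := rows.map (fun row => compose_row row rows n)
  (concepts.zip (rows.zip comp)).foldl (fun edges t =>
    (concepts.zip (t.2.1.zip t.2.2)).foldl (fun edges u =>
      if u.2.1 && !u.2.2 then edges ++ [(t.1.1, u.1.1)] else edges) edges) []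

-- ===== PRECONDITION & SPEC =====
def Spec_build_lattice (concepts : List (List Int × List Int)) (out : List (List Int × List Int)) : Prop := out = build_lattice_alt concepts
instance (concepts : List (List Int × List Int)) (out : List (List Int × List Int)) : Decidable (Spec_build_lattice concepts out) := by unfold Spec_build_lattice; infer_instance

-- ===== CLAIM (what is proved, stated in full; the proofs are below) =====
def Claim_equal_build_lattice : Prop := ∀ (concepts : List (List Int × List Int)), Dom_build_lattice concepts → Spec_build_lattice concepts (build_lattice concepts)

-- ===== LEMMAS AND PROOFS =====

theorem zip_self_map {α β : Type} (l : List α) (h : α → β) :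
    l.zip (l.map h) = l.map (fun x => (x, h x)) := by
  induction l with
  | nil => rfl
  | cons a t ih => simp [ih]

theorem zipWith_or_getD (c d : List Bool) (j : Nat) (h : c.length = d.length) :
    (c.zipWith (· || ·) d).getD j false = (c.getD j false || d.getD j false) := by
  induction c generalizing d j with
  | nil => cases d with
    | nil => simp
    | cons b bs => simp at h
  | cons a as ih =>
    cases d with
    | nil => simp at h
    | cons b bs =>
      cases j with
      | zero => simp
      | succ j => simpa using ih bs j (by simpa using h)

theorem length_fold_union {α : Type} (ms : List α) (pred : α → Bool) (g : α → List Bool)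
    (c : List Bool) (hg : ∀ m ∈ ms, (g m).length = c.length) :
    (ms.foldl (fun c m => if pred m then c.zipWith (· || ·) (g m) else c) c).length = c.length := by
  induction ms generalizing c with
  | nil => rfl
  | cons m ms ih =>
    simp only [List.foldl_cons]
    by_cases hp : pred m = true
    · rw [hp, if_pos rfl]
      have hlen : (c.zipWith (· || ·) (g m)).length = c.length := by
        simp [hg m (by simp)]
      rw [ih _ (fun x hx => by rw [hlen]; exact hg x (by simp [hx]))]
      exact hlen
    · rw [if_neg (by simpa using hp)]
      exact ih _ (fun x hx => hg x (by simp [hx]))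

theorem getD_fold_union {α : Type} (ms : List α) (pred : α → Bool) (g : α → List Bool)
    (c : List Bool) (j : Nat) (hg : ∀ m ∈ ms, (g m).length = c.length) :
    (ms.foldl (fun c m => if pred m then c.zipWith (· || ·) (g m) else c) c).getD j false
      = (c.getD j false || ms.any (fun m => pred m && (g m).getD j false)) := by
  induction ms generalizing c with
  | nil => simp
  | cons m ms ih =>
    simp only [List.foldl_cons, List.any_cons]
    by_cases hp : pred m = true
    · rw [hp, if_pos rfl]
      have hlen : (c.zipWith (· || ·) (g m)).length = c.length := by
        simp [hg m (by simp)]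
      rw [ih _ (fun x hx => by rw [hlen]; exact hg x (by simp [hx]))]
      rw [zipWith_or_getD c (g m) j (hg m (by simp)).symm]
      simp [Bool.or_assoc]
    · rw [if_neg (by simpa using hp), ih _ (fun x hx => hg x (by simp [hx]))]
      simp [hp]

theorem foldl_congr_mem' {α β : Type} (l : List α) (f g : β → α → β) (b : β)
    (h : ∀ acc, ∀ x ∈ l, f acc x = g acc x) : l.foldl f b = l.foldl g b := by
  induction l generalizing b with
  | nil => rfl
  | cons a t ih =>
    simp only [List.foldl_cons, h b a (by simp)]
    exact ih _ (fun acc x hx => h acc x (by simp [hx]))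

theorem bool4 (a b c d : Bool) : ((a && d) && (b && c)) = (a && b && c && d) := by
  cases a <;> cases b <;> cases c <;> cases d <;> rfl

theorem if_and_not_split (x y : Bool) (e : List (List Int × List Int)) (v : List Int × List Int) :
    (if (x && !y) = true then e ++ [v] else e)
      = if x = true then (if (!y) = true then e ++ [v] else e) else e := by
  cases x <;> cases y <;> rfl

-- compose_row on the relation rows computes the composed relation R∘R as a map
theorem compose_row_eq (cs : List (List Int × List Int)) (p : List Int × List Int) :
    compose_row (cs.map (fun q => setLt p.1 q.1 && setLt q.2 p.2))
        (cs.map (fun m => cs.map (fun q => setLt m.1 q.1 && setLt q.2 m.2))) cs.length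
      = cs.map (fun q => cs.any (fun m =>
          (setLt p.1 m.1 && setLt m.2 p.2) && (setLt m.1 q.1 && setLt q.2 m.2))) := by
  unfold compose_row
  rw [List.zip_map', List.foldl_map]
  have hg : ∀ m ∈ cs,
      ((fun m => cs.map (fun q => setLt m.1 q.1 && setLt q.2 m.2)) m).length
        = (List.replicate cs.length false).length := by
    intro m _; simp
  apply List.ext_getElem
  · rw [length_fold_union cs _ _ _ hg]; simp
  · intro j h1 h2
    have hlen1 : j < (List.replicate cs.length false).length := by
      rw [length_fold_union cs _ _ _ hg] at h1; simpa using h1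
    rw [← List.getD_eq_getElem _ false h1, ← List.getD_eq_getElem _ false h2]
    rw [getD_fold_union cs _ _ _ j hg]
    have hj : j < cs.length := by simpa using hlen1
    simp [List.getD_eq_getElem?_getD, hj]

theorem alt_eq (cs : List (List Int × List Int)) : build_lattice_alt cs = build_lattice cs := by
  unfold build_lattice_alt build_lattice
  simp only []
  rw [zip_self_map, List.map_map, zip_self_map, List.foldl_map]
  apply foldl_congr_mem'
  intro acc p _
  simp only [Function.comp]
  rw [compose_row_eq cs p, List.zip_map', zip_self_map, List.foldl_map]
  apply foldl_congr_mem'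
  intro acc2 q _
  dsimp only
  have hany : (fun (m : List Int × List Int) => (setLt p.1 m.1 && setLt m.2 p.2) && (setLt m.1 q.1 && setLt q.2 m.2))
      = (fun (pm : List Int × List Int) => setLt p.1 pm.1 && setLt pm.1 q.1 && setLt q.2 pm.2 && setLt pm.2 p.2) := by
    funext m
    exact bool4 (setLt p.1 m.1) (setLt m.1 q.1) (setLt q.2 m.2) (setLt m.2 p.2)
  rw [hany, if_and_not_split]

-- ===== VERDICT (by name: the statement is the Claim_ definition above) =====
theorem build_lattice_spec : Claim_equal_build_lattice := by
  intro concepts _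
  unfold Spec_build_lattice
  exact (alt_eq concepts).symm
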